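-- pv_equiv track=rewrite | github.com/Harishkumar18/data_structures | 450_qn_ds_lb/window_queries.py | solve
-- ===== SOURCE A (Python) =====
-- def solve(nums, queries, w):
--     res = []
--     for i in queries:
--         count = 0
--         for each in range(len(nums)-w+1):
--             if i in nums[each:(each+w)]:
--                 count+=1
--         res.append(count)
--     return res
-- ===== SOURCE B (Python) =====
-- def solve(nums, queries, w):
--     # One pass per query: slide a last-occurrence pointer instead of scanning each window.
--     res = []
--     for q in queries:
--         count = 0
--         last = -1
--         for j, x in enumerate(nums):
--             if x == q:
--                 last = j
--             s = j - w + 1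
--             if s >= 0 and last >= s:
--                 count += 1
--         res.append(count)
--     return res
-- ===== Notes on version B (the rewrite author's own statement) =====
-- stated objective: faster
-- what changed: Instead of scanning every window slice per query (copy + membership test of w elements per window), B makes a single left-to-right sweep per query maintaining the last-occurrence index and counts each window in O(1), removing the factor w.
-- intended difference: On w < 0 with len(nums) > -w and a query value occurring before the last element, A's slice end each+w wraps around Python-style and A reports phantom nonzero window counts, while B returns the intended 0 since no windows of negative size exist. — e.g. on solve([1, 2], [1], -1): A returns [1], B returns [0]
import Mathlib
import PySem

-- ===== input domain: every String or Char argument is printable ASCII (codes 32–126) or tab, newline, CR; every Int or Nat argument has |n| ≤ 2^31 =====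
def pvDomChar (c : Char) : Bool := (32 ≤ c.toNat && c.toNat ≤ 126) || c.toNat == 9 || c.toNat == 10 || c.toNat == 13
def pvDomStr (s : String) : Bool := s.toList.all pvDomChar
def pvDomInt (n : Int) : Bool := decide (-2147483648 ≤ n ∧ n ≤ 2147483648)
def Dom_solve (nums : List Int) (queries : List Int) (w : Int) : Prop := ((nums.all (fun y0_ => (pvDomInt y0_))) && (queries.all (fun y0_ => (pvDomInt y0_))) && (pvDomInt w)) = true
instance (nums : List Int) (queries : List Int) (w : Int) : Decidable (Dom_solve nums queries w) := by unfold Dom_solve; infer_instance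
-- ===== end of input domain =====

-- B replaces A's per-window slice scan by one last-occurrence sweep per query; on the
-- degenerate corner w < 0 (negative window size) A's slice end wraps around and counts
-- phantom windows while B counts none — stated as the intended difference D_solve below.


-- ===== PORT A =====
def solve (nums : List Int) (queries : List Int) (w : Int) : List Int :=
  queries.foldl (fun res i =>
    res ++ [(PySem.List.pyRange 0 ((nums.length : Int) - w + 1)).foldl
      (fun count each =>
        if i ∈ PySem.List.slice nums (some each) (some (each + w)) then count + 1 else count)
      (0 : Int)]) []

-- ===== PORT B =====
def solve_alt (nums : List Int) (queries : List Int) (w : Int) : List Int :=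
  queries.foldl (fun res q =>
    res ++ [((PySem.List.enumerate nums 0).foldl
      (fun (st : Int × Int) jx =>
        let last : Int := if jx.2 = q then jx.1 else st.2
        let s : Int := jx.1 - w + 1
        (if 0 ≤ s ∧ s ≤ last then st.1 + 1 else st.1, last))
      (0, -1)).1]) []

-- ===== PRECONDITION & SPEC =====
-- On w < 0 (a negative window size) with a query value occurring before the last element,
-- A's slice end index each+w wraps around Python-style and A reports phantom nonzero window
-- counts, while B returns the intended 0 (there are no windows of negative size).
def D_solve (nums : List Int) (queries : List Int) (w : Int) : Prop :=
  w < 0 ∧ 0 < (nums.length : Int) + w ∧ ∃ q ∈ queries, q ∈ nums.dropLast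
instance (nums : List Int) (queries : List Int) (w : Int) : Decidable (D_solve nums queries w) := by unfold D_solve; infer_instance

def Spec_solve (nums : List Int) (queries : List Int) (w : Int) (out : List Int) : Prop :=
  ¬ D_solve nums queries w → out = solve_alt nums queries w
instance (nums : List Int) (queries : List Int) (w : Int) (out : List Int) : Decidable (Spec_solve nums queries w out) := by unfold Spec_solve; infer_instance

def pvDiffWitness_solve : List Int × List Int × Int := ([1, 2], [1], -1)
def pvDiffWitnessOut_solve : (List Int) × (List Int) := ([1], [0])

-- ===== CLAIM (what is proved, stated in full; the proofs are below) =====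
def Claim_unchanged_solve : Prop := ∀ (nums : List Int) (queries : List Int) (w : Int), Dom_solve nums queries w → Spec_solve nums queries w (solve nums queries w)
def Claim_changed_solve : Prop := Dom_solve (pvDiffWitness_solve.1) (pvDiffWitness_solve.2.1) (pvDiffWitness_solve.2.2) ∧ D_solve (pvDiffWitness_solve.1) (pvDiffWitness_solve.2.1) (pvDiffWitness_solve.2.2) ∧ solve (pvDiffWitness_solve.1) (pvDiffWitness_solve.2.1) (pvDiffWitness_solve.2.2) = pvDiffWitnessOut_solve.1 ∧ solve_alt (pvDiffWitness_solve.1) (pvDiffWitness_solve.2.1) (pvDiffWitness_solve.2.2) = pvDiffWitnessOut_solve.2 ∧ pvDiffWitnessOut_solve.1 ≠ pvDiffWitnessOut_solve.2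
def Claim_exact_solve : Prop := ∀ (nums : List Int) (queries : List Int) (w : Int), Dom_solve nums queries w → D_solve nums queries w → solve nums queries w ≠ solve_alt nums queries w

-- ===== LEMMAS AND PROOFS =====

-- index of the last occurrence of q in l (-1 if absent), the pointer B's sweep maintains
def lastIdx (l : List Int) (q : Int) : Int :=
  if q ∈ l then (l.length : Int) - 1 - (l.reverse.idxOf q : Int) else -1

-- A's per-query inner loop
def aQ (nums : List Int) (q w : Int) : Int :=
  (PySem.List.pyRange 0 ((nums.length : Int) - w + 1)).foldl
    (fun count each =>
      if q ∈ PySem.List.slice nums (some each) (some (each + w)) then count + 1 else count)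
    (0 : Int)

-- B's per-query inner loop (state = (count, last))
def bQ (nums : List Int) (q w : Int) : Int × Int :=
  (PySem.List.enumerate nums 0).foldl
    (fun (st : Int × Int) jx =>
      let last : Int := if jx.2 = q then jx.1 else st.2
      let s : Int := jx.1 - w + 1
      (if 0 ≤ s ∧ s ≤ last then st.1 + 1 else st.1, last))
    (0, -1)

lemma solve_eq_map (nums queries : List Int) (w : Int) :
    solve nums queries w = queries.map (fun q => aQ nums q w) := by
  unfold solve aQ
  rw [PySem.List.foldl_append_singleton_eq_map]
  simp

lemma solve_alt_eq_map (nums queries : List Int) (w : Int) :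
    solve_alt nums queries w = queries.map (fun q => (bQ nums q w).1) := by
  unfold solve_alt bQ
  rw [PySem.List.foldl_append_singleton_eq_map]
  simp

lemma lastIdx_snoc (l : List Int) (x q : Int) :
    lastIdx (l ++ [x]) q = if x = q then (l.length : Int) else lastIdx l q := by
  by_cases hx : x = q
  · subst hx
    simp [lastIdx, List.reverse_append]
  · by_cases hq : q ∈ l
    · simp [lastIdx, hq, hx, List.reverse_append]
      omega
    · simp [lastIdx, hq, hx, List.reverse_append]

lemma le_lastIdx_iff (l : List Int) (q : Int) {s : Int} (hs : 0 ≤ s) :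
    s ≤ lastIdx l q ↔ q ∈ l.drop s.toNat := by
  induction l using List.reverseRecOn with
  | nil => simp [lastIdx]; omega
  | append_singleton l x ih =>
    rw [lastIdx_snoc]
    by_cases hle : s.toNat ≤ l.length
    · rw [List.drop_append_of_le_length hle]
      by_cases hx : x = q
      · rw [if_pos hx]
        have hm : q ∈ l.drop s.toNat ++ [x] := by simp [hx]
        constructor
        · intro _; exact hm
        · intro _; omega
      · simp only [if_neg hx, List.mem_append, List.mem_singleton, ih]
        constructor
        · intro h; exact Or.inl h
        · rintro (h | h)
          · exact h
          · exact absurd h.symm hx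
    · have hnil : (l ++ [x]).drop s.toNat = [] := by
        apply List.drop_eq_nil_of_le; simp; omega
      rw [hnil]
      simp only [List.not_mem_nil, iff_false]
      by_cases hx : x = q
      · simp only [if_pos hx]; omega
      · simp only [if_neg hx]
        rw [ih]
        have : l.drop s.toNat = [] := List.drop_eq_nil_of_le (by omega)
        simp [this]

-- B's sweep counts, over indices j, whether the window ending at j holds q
lemma bQ_eq (nums : List Int) (q w : Int) :
    bQ nums q w =
      ((((PySem.List.pyRange (w - 1) (nums.length : Int)).countP
          (fun j => decide (j - w + 1 ≤ lastIdx (nums.take (j + 1).toNat) q)) : Nat) : Int),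
        lastIdx nums q) := by
  induction nums using List.reverseRecOn with
  | nil =>
    have h0 : ((([] : List Int).length : Int)) = 0 := by simp
    rw [h0]
    have hcp : (PySem.List.pyRange (w - 1) 0).countP
        (fun j => decide (j - w + 1 ≤ lastIdx (([] : List Int).take (j + 1).toNat) q)) = 0 := by
      apply List.countP_eq_zero.mpr
      intro j hj
      rw [PySem.List.mem_pyRange_one] at hj
      simp only [List.take_nil, lastIdx, List.not_mem_nil, if_false]
      simp only [decide_eq_true_eq]
      omega
    rw [hcp]
    simp [bQ, PySem.List.enumerate, lastIdx]
  | append_singleton l x ih =>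
    have hstep : bQ (l ++ [x]) q w =
        (let last : Int := if x = q then (l.length : Int) else (bQ l q w).2
         ((if 0 ≤ (l.length : Int) - w + 1 ∧ (l.length : Int) - w + 1 ≤ last
           then (bQ l q w).1 + 1 else (bQ l q w).1), last)) := by
      simp only [bQ, PySem.List.enumerate_append, List.foldl_append]
      simp [PySem.List.enumerate]
    rw [hstep, ih]
    simp only []
    have hlast : (if x = q then (l.length : Int) else lastIdx l q) = lastIdx (l ++ [x]) q :=
      (lastIdx_snoc l x q).symm
    by_cases hw : w - 1 ≤ (l.length : Int)
    · have hlen : (((l ++ [x]).length : Int)) = (l.length : Int) + 1 := by simp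
      rw [hlen, PySem.List.pyRange_one_succ_right hw, List.countP_append]
      have hold : (PySem.List.pyRange (w - 1) (l.length : Int)).countP
            (fun j => decide (j - w + 1 ≤ lastIdx ((l ++ [x]).take (j + 1).toNat) q))
          = (PySem.List.pyRange (w - 1) (l.length : Int)).countP
            (fun j => decide (j - w + 1 ≤ lastIdx (l.take (j + 1).toNat) q)) := by
        apply List.countP_congr
        intro j hj
        rw [PySem.List.mem_pyRange_one] at hj
        rw [List.take_append_of_le_length (by omega)]
      have hnew : List.countP
            (fun j => decide (j - w + 1 ≤ lastIdx ((l ++ [x]).take (j + 1).toNat) q))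
            [(l.length : Int)]
          = if (l.length : Int) - w + 1 ≤ lastIdx (l ++ [x]) q then 1 else 0 := by
        have htake : ((l ++ [x]).take (((l.length : Int) + 1)).toNat) = l ++ [x] := by
          apply List.take_of_length_le; simp
        simp only [List.countP_cons, List.countP_nil, Nat.zero_add]
        rw [htake]
        simp
      rw [hold, hnew, hlast]
      by_cases h : (l.length : Int) - w + 1 ≤ lastIdx (l ++ [x]) q
      · rw [if_pos (⟨by omega, h⟩ : 0 ≤ (l.length : Int) - w + 1 ∧ _), if_pos h]
        simp
      · rw [if_neg (fun hh => h hh.2), if_neg h]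
        simp
    · have hnil1 : PySem.List.pyRange (w - 1) (((l ++ [x]).length : Int)) = [] := by
        apply PySem.List.pyRange_one_eq_nil; simp; omega
      have hnil2 : PySem.List.pyRange (w - 1) ((l.length : Int)) = [] := by
        apply PySem.List.pyRange_one_eq_nil; omega
      rw [hnil1, hnil2]
      have hc : ¬ (0 ≤ (l.length : Int) - w + 1 ∧ (l.length : Int) - w + 1 ≤ (if x = q then (l.length : Int) else lastIdx l q)) := by
        intro h; omega
      rw [if_neg hc, hlast]
      simp [List.countP_nil]

-- A's loop, reindexed by the window's last element j = each + w - 1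
lemma aQ_eq (nums : List Int) (q w : Int) :
    aQ nums q w =
      ((PySem.List.pyRange (w - 1) (nums.length : Int)).countP
          (fun j => decide (q ∈ PySem.List.slice nums (some (j - w + 1)) (some (j + 1)))) : Nat) := by
  unfold aQ
  have hfun : (fun (count each : Int) =>
      if q ∈ PySem.List.slice nums (some each) (some (each + w)) then count + 1 else count)
      = (fun count each =>
        if (fun each => decide (q ∈ PySem.List.slice nums (some each) (some (each + w)))) each = true
        then count + 1 else count) := by
    funext c e; simp
  rw [hfun, PySem.List.foldl_count_if, zero_add]
  rw [PySem.List.pyRange_one 0, PySem.List.pyRange_one (w - 1), List.countP_map, List.countP_map]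
  have hlen : ((nums.length : Int) - w + 1 - 0).toNat = ((nums.length : Int) - (w - 1)).toNat := by
    omega
  rw [hlen]
  congr 1
  apply List.countP_congr
  intro k _
  simp only [Function.comp]
  have h1 : (w - 1 + (k : Int)) - w + 1 = (0 : Int) + (k : Int) := by ring
  have h2 : (w - 1 + (k : Int)) + 1 = (0 : Int) + (k : Int) + w := by ring
  simp only [h1, h2]

-- any element of a slice with a negative (wrapped) end lies in nums.dropLast,
-- and such a slice is nonempty only when its start is below length + end
lemma mem_slice_neg_end (nums : List Int) (a b q : Int) (ha : 0 ≤ a) (hb : b < 0)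
    (h : q ∈ PySem.List.slice nums (some a) (some b)) :
    a < (nums.length : Int) + b ∧ q ∈ nums.dropLast := by
  simp only [PySem.List.slice, PySem.List.clampIdx] at h
  rw [if_neg (by omega : ¬ a < 0)] at h
  set ca := min a.toNat nums.length with hca
  by_cases hnb : (nums.length : Int) + b < 0
  · rw [if_pos hb, if_pos hnb] at h
    simp at h
  · rw [if_pos hb, if_neg hnb] at h
    set cb := ((nums.length : Int) + b).toNat with hcb
    by_cases hlt : ca < cb
    · have hrw : List.take (cb - ca) (List.drop ca nums)
          = List.drop ca (List.take (ca + (cb - ca)) nums) := by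
        rw [List.drop_take, Nat.add_sub_cancel_left]
      rw [hrw] at h
      have h1 : q ∈ List.take (ca + (cb - ca)) nums := List.mem_of_mem_drop h
      have hcan : ca + (cb - ca) = cb := by omega
      rw [hcan] at h1
      have hcb1 : cb ≤ nums.length - 1 := by omega
      have h2 : q ∈ List.take (nums.length - 1) nums := by
        have : List.take cb nums = List.take cb (List.take (nums.length - 1) nums) := by
          rw [List.take_take]; congr 1; omega
        rw [this] at h1
        exact List.mem_of_mem_take h1
      refine ⟨?_, by rw [List.dropLast_eq_take]; exact h2⟩
      have hfin : ¬ nums.length ≤ a.toNat := by omega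
      omega
    · have : cb - ca = 0 := by omega
      rw [this] at h
      simp at h

-- outside D_ the two per-window predicates agree on every window end j
lemma pred_eq (nums : List Int) (q w j : Int)
    (hj : w - 1 ≤ j) (_hjn : j < (nums.length : Int))
    (hD : ¬ (w < 0 ∧ 0 < (nums.length : Int) + w ∧ q ∈ nums.dropLast)) :
    (q ∈ PySem.List.slice nums (some (j - w + 1)) (some (j + 1))) ↔
      (j - w + 1 ≤ lastIdx (nums.take (j + 1).toNat) q) := by
  by_cases hj1 : 0 ≤ j + 1
  · rw [PySem.List.slice_toNat nums (by omega) hj1,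
        le_lastIdx_iff _ _ (by omega : (0:Int) ≤ j - w + 1), List.drop_take]
  · -- j + 1 < 0, hence w < 0; B's side is False, and A's side must be too
    have hw : w < 0 := by omega
    have htake : (j + 1).toNat = 0 := by omega
    rw [htake, List.take_zero]
    have hnil : lastIdx [] q = -1 := by simp [lastIdx]
    rw [hnil]
    constructor
    · intro hmem
      exfalso
      obtain ⟨hlt, hmemdl⟩ := mem_slice_neg_end nums (j - w + 1) (j + 1) q (by omega) (by omega) hmem
      exact hD ⟨hw, by omega, hmemdl⟩
    · intro h
      exfalso
      omega

lemma perQuery (nums : List Int) (q w : Int)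
    (hD : ¬ (w < 0 ∧ 0 < (nums.length : Int) + w ∧ q ∈ nums.dropLast)) :
    aQ nums q w = (bQ nums q w).1 := by
  rw [aQ_eq, bQ_eq]
  simp only [Nat.cast_inj]
  apply List.countP_congr
  intro j hjmem
  rw [PySem.List.mem_pyRange_one] at hjmem
  simp only [decide_eq_true_eq]
  exact pred_eq nums q w j (by omega) (by omega) hD

lemma lastIdx_lt (l : List Int) (q : Int) : lastIdx l q < (l.length : Int) := by
  rw [lastIdx]; split_ifs with h
  · have := List.length_pos_of_mem h
    omega
  · omega

lemma bQ_fst_zero_of_neg (nums : List Int) (q w : Int) (hw : w < 0) : (bQ nums q w).1 = 0 := by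
  rw [bQ_eq]
  simp only [Nat.cast_eq_zero]
  apply List.countP_eq_zero.mpr
  intro j hj
  rw [PySem.List.mem_pyRange_one] at hj
  simp only [decide_eq_true_eq]
  have hlt := lastIdx_lt (nums.take (j + 1).toNat) q
  have hlen : (nums.take (j + 1).toNat).length ≤ (j + 1).toNat := by
    simp [List.length_take]
  omega

lemma aQ_pos_of_neg (nums : List Int) (q w : Int) (hw : w < 0)
    (hnw : 0 < (nums.length : Int) + w) (hq : q ∈ nums.dropLast) :
    0 < aQ nums q w := by
  rw [aQ_eq]
  have hpos : 0 < (PySem.List.pyRange (w - 1) (nums.length : Int)).countP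
      (fun j => decide (q ∈ PySem.List.slice nums (some (j - w + 1)) (some (j + 1)))) := by
    apply List.countP_pos_iff.mpr
    obtain ⟨p, hp⟩ := List.mem_iff_getElem?.mp hq
    rw [List.getElem?_dropLast] at hp
    by_cases hplt : p < nums.length - 1
    swap
    · rw [if_neg hplt] at hp; exact absurd hp (by simp)
    rw [if_pos hplt] at hp
    set eachN : Nat := min p (-w - 1).toNat with heach
    refine ⟨(eachN : Int) + w - 1, ?_, ?_⟩
    · rw [PySem.List.mem_pyRange_one]
      constructor
      · omega
      · omega
    · simp only [decide_eq_true_eq]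
      have harg1 : (eachN : Int) + w - 1 - w + 1 = (eachN : Int) := by ring
      have harg2 : (eachN : Int) + w - 1 + 1 = (eachN : Int) + w := by ring
      rw [harg1, harg2]
      simp only [PySem.List.slice, PySem.List.clampIdx]
      rw [if_neg (by omega : ¬ (eachN : Int) < 0),
          if_pos (by omega : (eachN : Int) + w < 0),
          if_neg (by omega : ¬ (nums.length : Int) + ((eachN : Int) + w) < 0)]
      have htn : ((eachN : Int)).toNat = eachN := by omega
      rw [htn]
      have hmin : min eachN nums.length = eachN := by omega
      rw [hmin]
      apply List.mem_iff_getElem?.mpr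
      refine ⟨p - eachN, ?_⟩
      rw [List.getElem?_take, if_pos (by omega), List.getElem?_drop]
      have hi : eachN + (p - eachN) = p := by omega
      rw [hi]
      exact hp
  omega

lemma tight_main (nums queries : List Int) (w : Int)
    (hw : w < 0) (hnw : 0 < (nums.length : Int) + w)
    (q : Int) (hq : q ∈ queries) (hqd : q ∈ nums.dropLast) :
    solve nums queries w ≠ solve_alt nums queries w := by
  rw [solve_eq_map, solve_alt_eq_map]
  intro heq
  have hpt := List.map_eq_map_iff.mp heq q hq
  have h0 := bQ_fst_zero_of_neg nums q w hw
  have h1 := aQ_pos_of_neg nums q w hw hnw hqd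
  omega

-- ===== VERDICT (by name: the statement is the Claim_ definition above) =====
theorem solve_spec : Claim_unchanged_solve := by
  intro nums queries w _ hD
  rw [solve_eq_map, solve_alt_eq_map]
  apply List.map_congr_left
  intro q hq
  apply perQuery
  intro ⟨h1, h2, h3⟩
  exact hD ⟨h1, h2, q, hq, h3⟩

theorem solve_changed : Claim_changed_solve := by
  unfold Claim_changed_solve; decide

theorem solve_tight : Claim_exact_solve := by
  intro nums queries w _ hD
  obtain ⟨hw, hnw, q, hq, hqd⟩ := hD
  exact tight_main nums queries w hw hnw q hq hqd
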